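-- pv_equiv track=rewrite | github.com/UTATRocketry/Carina-Log-Parser | src/GUItools/tools.py | get_xaxis_index
-- ===== SOURCE A (Python) =====
-- def get_xaxis_index(xaxis: list, given_time) -> int:
--     if given_time == 0:
--         return given_time
--     elif given_time is None:
--         return len(xaxis)
--     else:
--         for i, t in enumerate(xaxis):
--             if t > given_time:
--                 return i - 1
-- ===== SOURCE B (Python) =====
-- def get_xaxis_index(xaxis: list, given_time) -> int:
--     if given_time == 0:
--         return given_time
--     if given_time is None:
--         return len(xaxis)
--
--     def first_hit(lo, hi):
--         # smallest index in [lo, hi) whose value exceeds given_time, else None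
--         if hi - lo == 0:
--             return None
--         if hi - lo == 1:
--             return lo if xaxis[lo] > given_time else None
--         mid = (lo + hi) // 2
--         left = first_hit(lo, mid)
--         return left if left is not None else first_hit(mid, hi)
--
--     h = first_hit(0, len(xaxis))
--     return None if h is None else h - 1
-- ===== Notes on version B (the rewrite author's own statement) =====
-- stated objective: alternative
-- what changed: B replaces A's left-to-right enumerate loop with early return by a divide-and-conquer recursion that splits the index range in half and combines the first-hit index of the two halves (left half wins), then subtracts 1.
import Mathlib
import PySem

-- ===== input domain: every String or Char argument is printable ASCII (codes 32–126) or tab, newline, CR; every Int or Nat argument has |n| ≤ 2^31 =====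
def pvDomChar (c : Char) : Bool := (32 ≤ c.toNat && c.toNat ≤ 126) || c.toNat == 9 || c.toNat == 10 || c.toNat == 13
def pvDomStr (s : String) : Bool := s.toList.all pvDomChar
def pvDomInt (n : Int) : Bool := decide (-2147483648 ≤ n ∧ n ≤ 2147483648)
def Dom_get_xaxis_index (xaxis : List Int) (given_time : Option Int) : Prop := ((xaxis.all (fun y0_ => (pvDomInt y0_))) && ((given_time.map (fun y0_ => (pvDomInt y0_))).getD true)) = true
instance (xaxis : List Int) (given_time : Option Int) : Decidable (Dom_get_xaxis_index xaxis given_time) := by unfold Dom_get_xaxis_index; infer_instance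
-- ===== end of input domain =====

-- B replaces A's left-to-right early-return scan with a divide-and-conquer recursion over
-- the index range (first hit of the left half, else of the right half); objective: alternative.


-- ===== PORT A =====
-- the 'for i, t in enumerate(xaxis)' loop: index accumulator i, early return i-1 on t > g, falls off to None
def pvGoA (g : Int) : List Int → Nat → Option Int
  | [], _ => none
  | t :: rest, i => if t > g then some ((i : Int) - 1) else pvGoA g rest (i + 1)

def get_xaxis_index (xaxis : List Int) (given_time : Option Int) : Option Int :=
  match given_time with
  | some 0 => some 0
  | none => some (xaxis.length : Int)
  | some g => pvGoA g xaxis 0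

-- ===== PORT B =====
-- first_hit(lo, hi): smallest index in [lo, hi) whose value exceeds g, else none.
-- xaxis[lo] is always in range here (0 ≤ lo < hi ≤ len), so List.getD is exact for Python's xaxis[lo].
def pvFirstHit (xs : List Int) (g : Int) (lo hi : Nat) : Option Nat :=
  if hi - lo = 0 then none
  else if hi - lo = 1 then (if xs.getD lo 0 > g then some lo else none)
  else
    -- mid = (lo + hi) // 2
    match pvFirstHit xs g lo ((lo + hi) / 2) with
    | some l => some l
    | none => pvFirstHit xs g ((lo + hi) / 2) hi
termination_by hi - lo
decreasing_by all_goals omega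

def get_xaxis_index_alt (xaxis : List Int) (given_time : Option Int) : Option Int :=
  match given_time with
  | some 0 => some 0
  | none => some (xaxis.length : Int)
  | some g =>
    match pvFirstHit xaxis g 0 xaxis.length with
    | none => none
    | some h => some ((h : Int) - 1)

-- ===== PRECONDITION & SPEC =====
def Spec_get_xaxis_index (xaxis : List Int) (given_time : Option Int) (out : Option Int) : Prop := out = get_xaxis_index_alt xaxis given_time
instance (xaxis : List Int) (given_time : Option Int) (out : Option Int) : Decidable (Spec_get_xaxis_index xaxis given_time out) := by unfold Spec_get_xaxis_index; infer_instance

-- ===== CLAIM (what is proved, stated in full; the proofs are below) =====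
def Claim_equal_get_xaxis_index : Prop := ∀ (xaxis : List Int) (given_time : Option Int), Dom_get_xaxis_index xaxis given_time → Spec_get_xaxis_index xaxis given_time (get_xaxis_index xaxis given_time)

-- ===== LEMMAS AND PROOFS =====
-- reference: index (from the front) of the first element exceeding g
def pvRef (g : Int) : List Int → Option Nat
  | [] => none
  | t :: rest => if t > g then some 0 else (pvRef g rest).map (· + 1)

theorem pvRef_append (g : Int) (a b : List Int) :
    pvRef g (a ++ b) =
      match pvRef g a with
      | some k => some k
      | none => (pvRef g b).map (· + a.length) := by
  induction a with
  | nil => simp [pvRef]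
  | cons t rest ih =>
    by_cases h : t > g
    · simp [pvRef, h]
    · simp only [List.cons_append, pvRef, if_neg h, ih]
      cases hr : pvRef g rest with
      | some k => simp
      | none =>
        simp only [Option.map_map, List.length_cons]
        cases pvRef g b <;> simp

theorem pvGoA_eq (g : Int) (xs : List Int) (i : Nat) :
    pvGoA g xs i = (pvRef g xs).map (fun k => (i : Int) + (k : Int) - 1) := by
  induction xs generalizing i with
  | nil => simp [pvGoA, pvRef]
  | cons t rest ih =>
    by_cases h : t > g
    · simp [pvGoA, pvRef, h]
    · simp only [pvGoA, if_neg h, pvRef, ih (i + 1)]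
      cases pvRef g rest <;> simp
      ring

theorem pvFirstHit_eq (xs : List Int) (g : Int) (n lo hi : Nat)
    (hn : hi - lo = n) (hle : lo ≤ hi) (hhi : hi ≤ xs.length) :
    pvFirstHit xs g lo hi = (pvRef g ((xs.drop lo).take (hi - lo))).map (· + lo) := by
  induction n using Nat.strong_induction_on generalizing lo hi with
  | _ n ih =>
    rw [pvFirstHit]
    by_cases h0 : hi - lo = 0
    · simp [h0, pvRef]
    · by_cases h1 : hi - lo = 1
      · have hlt : lo < xs.length := by omega
        rw [if_neg h0, if_pos h1, h1, List.drop_eq_getElem_cons hlt]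
        simp only [List.take_succ_cons, List.take_zero, pvRef,
          List.getD_eq_getElem?_getD, List.getElem?_eq_getElem hlt, Option.getD_some]
        split <;> simp
      · rw [if_neg h0, if_neg h1]
        have hmid1 : lo < (lo + hi) / 2 := by omega
        have hmid2 : (lo + hi) / 2 < hi := by omega
        rw [ih ((lo + hi) / 2 - lo) (by omega) lo ((lo + hi) / 2) rfl (by omega) (by omega),
            ih (hi - (lo + hi) / 2) (by omega) ((lo + hi) / 2) hi rfl (by omega) hhi]
        have hsplit : (xs.drop lo).take (hi - lo)
            = (xs.drop lo).take ((lo + hi) / 2 - lo)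
              ++ (xs.drop ((lo + hi) / 2)).take (hi - (lo + hi) / 2) := by
          have : (xs.drop ((lo + hi) / 2)) = (xs.drop lo).drop ((lo + hi) / 2 - lo) := by
            rw [List.drop_drop]; congr 1; omega
          rw [this, ← List.take_add]; congr 1; omega
        rw [hsplit, pvRef_append]
        cases hL : pvRef g ((xs.drop lo).take ((lo + hi) / 2 - lo)) with
        | some k => simp
        | none =>
          simp only [Option.map_map]
          cases pvRef g ((xs.drop ((lo + hi) / 2)).take (hi - (lo + hi) / 2)) <;> simp
          have : ((xs.drop lo).take ((lo + hi) / 2 - lo)).length = (lo + hi) / 2 - lo := by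
            rw [List.length_take]; have := List.length_drop (l := xs) (i := lo); omega
          omega

-- ===== VERDICT (by name: the statement is the Claim_ definition above) =====
theorem get_xaxis_index_spec : Claim_equal_get_xaxis_index := by
  intro xaxis given_time _
  unfold Spec_get_xaxis_index get_xaxis_index get_xaxis_index_alt
  match given_time with
  | some 0 => rfl
  | none => rfl
  | some g =>
    by_cases h0 : g = 0
    · subst h0; rfl
    · simp only
      rw [pvGoA_eq, pvFirstHit_eq xaxis g xaxis.length 0 xaxis.length rfl (Nat.zero_le _) le_rfl]
      simp only [List.drop_zero, Nat.sub_zero, List.take_length]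
      cases pvRef g xaxis <;> simp
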